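-- pv_equiv track=rewrite | github.com/ni3ol/twitter-feed | src/main.py | get_new_users
-- ===== SOURCE A (Python) =====
-- def get_new_users(users, user_followers):
--     '''Get new users.
--     '''
--     new_users = set()
--     user = user_followers[0]
--     followers = user_followers[1]
--     if user not in users:
--         new_users.add(user)
--     for follower in followers:
--         if follower not in users:
--             new_users.add(follower)
--     return new_users
-- ===== SOURCE B (Python) =====
-- def get_new_users(users, user_followers):
--     remaining = dict.fromkeys([user_followers[0], *user_followers[1]])
--     for known in users:
--         remaining.pop(known, None)
--     return set(remaining)
-- ===== Notes on version B (the rewrite author's own statement) =====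
-- stated objective: alternative
-- what changed: Instead of scanning candidates and testing each against the users list, B indexes all candidates (user plus followers) in an insertion-ordered dict once and then iterates over the USERS, deleting each from the dict; the remaining keys are the new users, so no per-candidate membership test remains.
import Mathlib
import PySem

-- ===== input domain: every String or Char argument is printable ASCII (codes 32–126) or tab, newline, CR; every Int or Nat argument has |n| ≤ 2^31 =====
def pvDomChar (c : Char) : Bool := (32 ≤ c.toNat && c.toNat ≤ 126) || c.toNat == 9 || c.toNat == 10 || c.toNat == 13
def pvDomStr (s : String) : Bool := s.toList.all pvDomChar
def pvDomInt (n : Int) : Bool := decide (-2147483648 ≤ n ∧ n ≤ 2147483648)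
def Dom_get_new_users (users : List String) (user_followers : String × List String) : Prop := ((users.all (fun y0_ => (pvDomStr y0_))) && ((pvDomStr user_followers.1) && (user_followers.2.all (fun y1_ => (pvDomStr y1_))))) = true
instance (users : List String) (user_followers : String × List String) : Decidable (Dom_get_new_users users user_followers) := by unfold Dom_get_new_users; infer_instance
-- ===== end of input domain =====

-- B replaces A's guarded candidate scan by indexing the candidates in an insertion-ordered dict and deleting each user from it; alternative traversal, same result.

-- ===== PORT A =====
def get_new_users (users : List String) (user_followers : String × List String) : List String :=
  let new_users : PySem.Set String := PySem.Set.empty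
  let user := user_followers.1
  let followers := user_followers.2
  let new_users := if users.contains user then new_users else PySem.Set.add new_users user
  followers.foldl (fun s follower => if users.contains follower then s else PySem.Set.add s follower) new_users

-- ===== PORT B =====
def get_new_users_alt (users : List String) (user_followers : String × List String) : List String :=
  let remaining : PySem.Dict String (Option Unit) :=
    PySem.Dict.ofList ((user_followers.1 :: user_followers.2).map (fun c => (c, none)))
  let remaining := users.foldl (fun d known => d.erase known) remaining
  PySem.Set.ofList remaining.keys

-- ===== PRECONDITION & SPEC =====
def Spec_get_new_users (users : List String) (user_followers : String × List String) (out : List String) : Prop := out = get_new_users_alt users user_followers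
instance (users : List String) (user_followers : String × List String) (out : List String) : Decidable (Spec_get_new_users users user_followers out) := by unfold Spec_get_new_users; infer_instance

-- ===== CLAIM (what is proved, stated in full; the proofs are below) =====
def Claim_equal_get_new_users : Prop := ∀ (users : List String) (user_followers : String × List String), Dom_get_new_users users user_followers → Spec_get_new_users users user_followers (get_new_users users user_followers)

-- ===== LEMMAS AND PROOFS =====

-- adding an element already excluded by the filter does not change the filtered update
theorem pv_filter_update_add (users : List String) (x : String) (hx : users.contains x = true) :
    ∀ (xs s : List String),
      (PySem.Set.update s xs).filter (fun a => !users.contains a)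
        = (PySem.Set.update (PySem.Set.add s x) xs).filter (fun a => !users.contains a) := by
  intro xs s
  rw [PySem.Set.update_eq_append_filter, PySem.Set.update_eq_append_filter]
  by_cases hs : PySem.Set.contains s x = true
  · have hmem : x ∈ s := by simpa [PySem.Set.contains] using hs
    have hadd : PySem.Set.add s x = s := by simp [PySem.Set.add, PySem.Set.contains, hmem]
    rw [hadd]
  · have hmem : x ∉ s := by simpa [PySem.Set.contains] using hs
    have hadd : PySem.Set.add s x = s ++ [x] := by
      simp [PySem.Set.add, PySem.Set.contains, hmem]
    rw [hadd]
    have hxu : x ∈ users := by simpa using hx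
    have h1 : List.filter (fun a => !users.contains a) [x] = [] := by simp [hxu]
    simp only [List.filter_append, h1, List.append_nil]
    congr 1
    rw [List.filter_filter, List.filter_filter]
    apply List.filter_congr
    intro y _
    by_cases hy : y ∈ users
    · simp [hy]
    · have hyx : y ≠ x := by
        intro h; rw [h] at hy; exact hy hxu
      simp [hy, PySem.Set.contains, hyx]

-- A's guarded accumulation loop is the filtered set-update
theorem pv_foldl_guard (users : List String) :
    ∀ (xs s : List String), (∀ a ∈ s, users.contains a = false) →
      xs.foldl (fun s follower => if users.contains follower then s else PySem.Set.add s follower) s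
        = (PySem.Set.update s xs).filter (fun a => !users.contains a) := by
  intro xs
  induction xs with
  | nil =>
      intro s hs
      simp only [List.foldl_nil, PySem.Set.update, List.foldl_nil]
      exact (List.filter_eq_self.mpr (by intro a ha; simp only [hs a ha, Bool.not_false])).symm
  | cons x xs ih =>
      intro s hs
      have hup : PySem.Set.update s (x :: xs) = PySem.Set.update (PySem.Set.add s x) xs := by
        simp [PySem.Set.update]
      by_cases hx : users.contains x = true
      · simp only [List.foldl_cons, hx, if_true]
        rw [ih s hs, hup, pv_filter_update_add users x hx xs s]
      · simp only [List.foldl_cons, hx, Bool.false_eq_true, if_false]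
        rw [ih (PySem.Set.add s x) ?_, hup]
        intro a ha
        rcases (PySem.Set.mem_add _ _ _).mp ha with h | h
        · exact hs a h
        · rw [h]; simpa using hx

-- one erase drops exactly that key from the key list
theorem pv_keys_erase {ν : Type} (d : PySem.Dict String ν) (k : String) :
    (d.erase k).keys = d.keys.filter (fun x => !(x == k)) := by
  simp [PySem.Dict.erase, PySem.Dict.keys, List.filter_map, Function.comp_def]

-- B's deletion loop filters the key list by non-membership in users
theorem pv_keys_foldl_erase {ν : Type} :
    ∀ (us : List String) (d : PySem.Dict String ν),
      (us.foldl (fun d known => d.erase known) d).keys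
        = d.keys.filter (fun x => !us.contains x) := by
  intro us
  induction us with
  | nil =>
      intro d
      exact (List.filter_eq_self.mpr (by intro a _; simp)).symm
  | cons u us ih =>
      intro d
      rw [List.foldl_cons, ih (d.erase u), pv_keys_erase, List.filter_filter]
      apply List.filter_congr
      intro y _
      by_cases hy : y = u
      · simp [hy]
      · simp [hy]

-- ===== VERDICT (by name: the statement is the Claim_ definition above) =====
theorem get_new_users_spec : Claim_equal_get_new_users := by
  intro users uf _
  unfold Spec_get_new_users get_new_users get_new_users_alt
  simp only
  -- B's dict of candidates has key list set(uf.1 :: uf.2)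
  have hkeys : (PySem.Dict.ofList ((uf.1 :: uf.2).map (fun c => (c, (none : Option Unit))))).keys
      = PySem.Set.ofList (uf.1 :: uf.2) := by
    unfold PySem.Dict.ofList PySem.Dict.update
    rw [PySem.Dict.keys_foldl_insert_key ((uf.1 :: uf.2).map (fun c => (c, (none : Option Unit))))
        Prod.fst (fun _ p => p.2)]
    simp only [List.map_map]
    have hm : (Prod.fst ∘ fun c => ((c : String), (none : Option Unit))) = id := rfl
    rw [hm, List.map_id, PySem.Dict.keys_empty, PySem.Set.update_nil_left]
  rw [pv_keys_foldl_erase users _, hkeys]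
  rw [PySem.Set.ofList_eq_self_of_nodup _ ((PySem.Set.nodup_ofList _).filter _)]
  have hsplit : PySem.Set.ofList (uf.1 :: uf.2) = PySem.Set.update [uf.1] uf.2 := by
    rw [show uf.1 :: uf.2 = [uf.1] ++ uf.2 from rfl, PySem.Set.ofList_append]
    rfl
  rw [hsplit]
  by_cases hu : users.contains uf.1 = true
  · simp only [hu, if_true]
    rw [pv_foldl_guard users uf.2 PySem.Set.empty (by intro a ha; simp [PySem.Set.empty] at ha)]
    have h1 : ([uf.1] : List String) = PySem.Set.add PySem.Set.empty uf.1 := by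
      simp [PySem.Set.add, PySem.Set.empty, PySem.Set.contains]
    rw [h1, ← pv_filter_update_add users uf.1 hu uf.2 PySem.Set.empty]
  · simp only [hu, Bool.false_eq_true, if_false]
    have hadd : PySem.Set.add PySem.Set.empty uf.1 = [uf.1] := by
      simp [PySem.Set.add, PySem.Set.empty, PySem.Set.contains]
    rw [hadd, pv_foldl_guard users uf.2 [uf.1] ?_]
    intro a ha
    simp at ha; rw [ha]; simpa using hu
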